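-- pv_equiv track=rewrite | github.com/devlucasaf/UniCeub | 4 semestre/Sistemas Operacionais/agosto/aula dia 26-08/aula_26_08_pe_de_meia_total_incossistente.py | split_even
-- ===== SOURCE A (Python) =====
-- def split_even(seq, k):
--     k = max(1, min(k, len(seq)))
--     base = len(seq) // k
--     extra = len(seq) % k
--     out = []
--     start = 0
--     for i in range(k):
--         size = base + (1 if i < extra else 0)
--         out.append(seq[start:start+size])
--         start += size
--     return out
-- ===== SOURCE B (Python) =====
-- def split_even(seq, k):
--     n = len(seq)
--     k = max(1, min(k, n))
--     base, extra = divmod(n, k)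
--     cut = extra * (base + 1)
--     head, tail = seq[:cut], seq[cut:]
--     return [head[j * (base + 1):(j + 1) * (base + 1)] for j in range(extra)] + \
--            [tail[j * base:(j + 1) * base] for j in range(k - extra)]
-- ===== Notes on version B (the rewrite author's own statement) =====
-- stated objective: alternative
-- what changed: B replaces A's sequential fold with a running start accumulator and a per-iteration conditional by a two-phase construction: it splits the list once at the closed-form cut point extra*(base+1) and emits the uniform-stride (base+1)-chunks of the head and base-chunks of the tail with two independent comprehensions.
import Mathlib
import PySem

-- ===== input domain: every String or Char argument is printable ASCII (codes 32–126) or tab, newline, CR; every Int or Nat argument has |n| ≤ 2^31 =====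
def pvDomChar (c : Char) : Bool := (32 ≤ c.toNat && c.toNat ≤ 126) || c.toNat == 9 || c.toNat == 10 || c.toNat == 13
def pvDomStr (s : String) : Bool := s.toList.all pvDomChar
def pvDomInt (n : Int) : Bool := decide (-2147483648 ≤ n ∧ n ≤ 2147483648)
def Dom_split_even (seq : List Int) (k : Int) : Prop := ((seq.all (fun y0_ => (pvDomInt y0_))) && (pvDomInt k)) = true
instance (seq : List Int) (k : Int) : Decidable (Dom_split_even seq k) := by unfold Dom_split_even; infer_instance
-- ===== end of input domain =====

-- B builds the same near-even chunks by splitting once at the closed-form cut extra*(base+1)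
-- and emitting two uniform-stride runs of slices, instead of A's running-start loop (alternative decomposition, same cost).

-- ===== PORT A =====
def split_even (seq : List Int) (k : Int) : List (List Int) :=
  let k1 : Int := max 1 (min k (seq.length : Int))
  let base : Int := PySem.Int.floordiv (seq.length : Int) k1
  let extra : Int := PySem.Int.mod (seq.length : Int) k1
  let st :=
    (PySem.List.pyRange 0 k1 1).foldl
      (fun (s : List (List Int) × Int) (i : Int) =>
        let size : Int := base + (if i < extra then 1 else 0)
        (s.1 ++ [PySem.List.slice seq (some s.2) (some (s.2 + size))], s.2 + size))
      ([], 0)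
  st.1

-- ===== PORT B =====
def split_even_alt (seq : List Int) (k : Int) : List (List Int) :=
  let n : Int := (seq.length : Int)
  let k1 : Int := max 1 (min k n)
  let base : Int := PySem.Int.floordiv n k1
  let extra : Int := PySem.Int.mod n k1
  let cut : Int := extra * (base + 1)
  let head : List Int := PySem.List.slice seq none (some cut)
  let tail : List Int := PySem.List.slice seq (some cut) none
  ((PySem.List.pyRange 0 extra 1).map
      (fun j => PySem.List.slice head (some (j * (base + 1))) (some ((j + 1) * (base + 1)))))
  ++ ((PySem.List.pyRange 0 (k1 - extra) 1).map
      (fun j => PySem.List.slice tail (some (j * base)) (some ((j + 1) * base))))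

-- ===== PRECONDITION & SPEC =====
def Spec_split_even (seq : List Int) (k : Int) (out : List (List Int)) : Prop := out = split_even_alt seq k
instance (seq : List Int) (k : Int) (out : List (List Int)) : Decidable (Spec_split_even seq k out) := by unfold Spec_split_even; infer_instance

-- ===== CLAIM (what is proved, stated in full; the proofs are below) =====
def Claim_equal_split_even : Prop := ∀ (seq : List Int) (k : Int), Dom_split_even seq k → Spec_split_even seq k (split_even seq k)

-- ===== LEMMAS AND PROOFS =====

/-- The common chunk description: chunk `i` (0-based) of the near-even split with
quotient `B` and remainder `E`. -/
def pvChunk (seq : List Int) (B E i : Nat) : List Int :=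
  (seq.drop (i * B + min i E)).take (B + if i < E then 1 else 0)

/-- A's loop invariant: after `m` iterations the accumulator holds the first `m` chunks
and the running start equals `m*B + min m E`. -/
lemma pv_loopA (seq : List Int) (B E m : Nat) :
    (PySem.List.pyRange 0 (m : Int) 1).foldl
      (fun (s : List (List Int) × Int) (i : Int) =>
        (s.1 ++ [PySem.List.slice seq (some s.2)
            (some (s.2 + ((B : Int) + (if i < (E : Int) then 1 else 0))))],
         s.2 + ((B : Int) + (if i < (E : Int) then 1 else 0))))
      ([], 0)
    = ((List.range m).map (pvChunk seq B E), ((m * B + min m E : Nat) : Int)) := by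
  induction m with
  | zero => simp [PySem.List.pyRange_one_eq_nil]
  | succ m ih =>
    rw [show ((m + 1 : Nat) : Int) = (m : Int) + 1 by push_cast; ring,
        PySem.List.pyRange_one_succ_right (by positivity), List.foldl_append, ih]
    simp only [List.foldl_cons, List.foldl_nil, List.range_succ, List.map_append, List.map_cons,
      List.map_nil]
    by_cases hm : m < E
    · have hlt : (m : Int) < (E : Int) := by exact_mod_cast hm
      simp only [if_pos hlt, Prod.mk.injEq]
      refine ⟨?_, ?_⟩
      · congr 1
        simp only [pvChunk, if_pos hm]
        rw [show ((m * B + min m E : Nat) : Int) + ((B : Int) + 1)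
              = ((m * B + min m E : Nat) : Int) + ((B + 1 : Nat) : Int) by push_cast; ring,
           PySem.List.slice_natCast_add]
      · have hnat : (m + 1) * B + min (m + 1) E = (m * B + min m E) + (B + 1) := by
          rw [Nat.succ_mul]; omega
        rw [hnat]; push_cast; ring
    · have hlt : ¬ (m : Int) < (E : Int) := by exact_mod_cast hm
      simp only [if_neg hlt, Prod.mk.injEq]
      refine ⟨?_, ?_⟩
      · congr 1
        simp only [pvChunk, if_neg hm]
        rw [show ((m * B + min m E : Nat) : Int) + ((B : Int) + 0)
              = ((m * B + min m E : Nat) : Int) + ((B : Nat) : Int) by push_cast; ring,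
           PySem.List.slice_natCast_add]
        simp
      · have hnat : (m + 1) * B + min (m + 1) E = (m * B + min m E) + B := by
          rw [Nat.succ_mul]; omega
        rw [hnat]; push_cast; ring

-- head chunks: for j < E, the j-th (B+1)-slice of seq.take (E*(B+1)) is chunk j
lemma pv_head_chunk (seq : List Int) (B E j : Nat) (hj : j < E) :
    ((seq.take (E * (B + 1))).drop (j * (B + 1))).take (B + 1) = pvChunk seq B E j := by
  rw [List.drop_take, List.take_take]
  have h1 : min (B + 1) (E * (B + 1) - j * (B + 1)) = B + 1 := by
    have h2 : (j + 1) * (B + 1) ≤ E * (B + 1) := Nat.mul_le_mul_right _ hj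
    rw [Nat.succ_mul] at h2
    omega
  rw [h1, pvChunk, if_pos hj]
  have : j * (B + 1) = j * B + min j E := by
    have : min j E = j := by omega
    rw [this]; ring
  rw [this]

-- tail chunks: for any j, the j-th B-slice of seq.drop (E*(B+1)) is chunk (E + j)
lemma pv_tail_chunk (seq : List Int) (B E j : Nat) :
    ((seq.drop (E * (B + 1))).drop (j * B)).take B = pvChunk seq B E (E + j) := by
  rw [List.drop_drop, pvChunk, if_neg (by omega)]
  have h1 : (E + j) * B + min (E + j) E = E * (B + 1) + j * B := by
    rw [Nat.add_mul, Nat.mul_succ]; omega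
  rw [h1]
  simp

theorem pv_main (seq : List Int) (k : Int) :
    split_even seq k = split_even_alt seq k := by
  unfold split_even split_even_alt
  have hk1pos : (0 : Int) < max 1 (min k (seq.length : Int)) := by positivity
  set K : Nat := (max 1 (min k (seq.length : Int))).toNat with hK
  have hk1K : max 1 (min k (seq.length : Int)) = (K : Int) := by
    rw [hK, Int.toNat_of_nonneg hk1pos.le]
  have hKpos : 0 < K := by omega
  set B : Nat := seq.length / K with hB
  set E : Nat := seq.length % K with hE
  have hEK : E < K := Nat.mod_lt _ hKpos
  have hbase : PySem.Int.floordiv (seq.length : Int) (K : Int) = (B : Int) := by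
    exact_mod_cast PySem.Int.floordiv_natCast seq.length K
  have hextra : PySem.Int.mod (seq.length : Int) (K : Int) = (E : Int) := by
    exact_mod_cast PySem.Int.mod_natCast seq.length K
  simp only [hk1K, hbase, hextra]
  -- A side
  rw [pv_loopA seq B E K]
  -- B side: ranges to Nat ranges
  have hcut : (E : Int) * ((B : Int) + 1) = ((E * (B + 1) : Nat) : Int) := by push_cast; ring
  rw [hcut, PySem.List.slice_to_natCast, PySem.List.slice_from_natCast]
  have hrange2 : (K : Int) - (E : Int) = ((K - E : Nat) : Int) := by omega
  rw [hrange2]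
  rw [PySem.List.pyRange_one 0 (E : Int), PySem.List.pyRange_one 0 ((K - E : Nat) : Int)]
  simp only [sub_zero, Int.toNat_natCast, List.map_map]
  -- turn both mapped functions into pvChunk
  have hmap1 : ∀ j ∈ List.range E,
      ((fun j => PySem.List.slice (seq.take (E * (B + 1))) (some (j * ((B : Int) + 1)))
          (some ((j + 1) * ((B : Int) + 1)))) ∘ (fun j : Nat => (0 : Int) + j)) j
        = pvChunk seq B E j := by
    intro j hj
    have hj' : j < E := List.mem_range.mp hj
    simp only [Function.comp, zero_add]
    rw [show ((j : Int) + 1) * ((B : Int) + 1)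
          = (j : Int) * ((B : Int) + 1) + ((B : Int) + 1) by ring,
        show (j : Int) * ((B : Int) + 1) = ((j * (B + 1) : Nat) : Int) by push_cast; ring,
        show ((j * (B + 1) : Nat) : Int) + ((B : Int) + 1)
          = ((j * (B + 1) : Nat) : Int) + ((B + 1 : Nat) : Int) by push_cast; ring,
        PySem.List.slice_natCast_add]
    exact pv_head_chunk seq B E j hj'
  have hmap2 : ∀ j ∈ List.range (K - E),
      ((fun j => PySem.List.slice (seq.drop (E * (B + 1))) (some (j * (B : Int)))
          (some ((j + 1) * (B : Int)))) ∘ (fun j : Nat => (0 : Int) + j)) j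
        = pvChunk seq B E (E + j) := by
    intro j _
    simp only [Function.comp, zero_add]
    rw [show ((j : Int) + 1) * (B : Int) = (j : Int) * (B : Int) + (B : Int) by ring,
        show (j : Int) * (B : Int) = ((j * B : Nat) : Int) by push_cast; ring,
        show ((j * B : Nat) : Int) + (B : Int)
          = ((j * B : Nat) : Int) + ((B : Nat) : Int) by push_cast; ring,
        PySem.List.slice_natCast_add]
    exact pv_tail_chunk seq B E j
  rw [List.map_congr_left hmap1, List.map_congr_left hmap2]
  -- assemble: range K = range E ++ shifted range (K - E)
  have hsplit : List.range K = List.range E ++ (List.range (K - E)).map (E + ·) := by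
    rw [← List.range_add]
    congr 1
    omega
  rw [hsplit, List.map_append, List.map_map]
  rfl

-- ===== VERDICT (by name: the statement is the Claim_ definition above) =====
theorem split_even_spec : Claim_equal_split_even := by
  intro seq k _
  exact pv_main seq k
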